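-- pv_equiv track=rewrite | github.com/ZihaoLian/CDT | backend/cdt 2/cdt/cdt_feature_creator.py | get_error_area_and_lack_digit
-- ===== SOURCE A (Python) =====
-- def get_error_area_and_lack_digit(digit_info,digit_size,times):
--     error_area=[]
--     lack_digit=[]
--     adequate_digit=[]
--     '''
--     if times ==1:
--         for i in range(len(digit_info)):
--             if len(digit_info[i])>digit_size[i]:
--                 #区域对应数字的个数过多
--                 error_area.extend([ x+[i,j] for j,x in enumerate(digit_info[i]) if x])
--             elif len(digit_info[i])<digit_size[i]:
--                 #贪心，数字缺失时对应的区域认为没有错误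
--                 lack_digit.append(i)
--             else:
--                 adequate_digit.append(i)
--                 #区域得分低
--                 error_area.extend([x+[i,j] for j,x in enumerate(digit_info[i]) if x and x[1]<=0.9])
--     else:
--     '''
--     for i in range(len(digit_info)):
--         error_area.extend([x+[i,j] for j,x in enumerate(digit_info[i]) if x])
--         if len(digit_info[i])<digit_size[i]:
--             lack_digit.append(i)
--         else:
--             adequate_digit.append(i)
--     #可能错误区域按极坐标系theta ,r 从大到小排序
--     error_area=sorted(error_area,key=(lambda x:(x[3],x[2])))
--     return error_area,adequate_digit,lack_digit
-- ===== SOURCE B (Python) =====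
-- def get_error_area_and_lack_digit(digit_info, digit_size, times):
--     # group the padded entries by their (theta, r) key in a dict, then emit the
--     # groups in sorted key order: only the distinct keys are ever sorted
--     groups = {}
--     for i, row in enumerate(digit_info):
--         for j, x in enumerate(row):
--             if x:
--                 e = x + [i, j]
--                 key = (e[3], e[2])
--                 groups.setdefault(key, []).append(e)
--     error_area = [e for key in sorted(groups) for e in groups[key]]
--     lack_digit = [i for i, row in enumerate(digit_info) if len(row) < digit_size[i]]
--     adequate_digit = [i for i, row in enumerate(digit_info) if not len(row) < digit_size[i]]
--     return error_area, adequate_digit, lack_digit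
-- ===== Notes on version B (the rewrite author's own statement) =====
-- stated objective: alternative
-- what changed: B never sorts the entries: it groups the padded entries by their (x[3], x[2]) key tuple in a dict during the nested row/cell scan and emits the groups in sorted key order (only the distinct keys are sorted), instead of accumulating everything in an index loop and sorting the whole list with a key lambda; lack/adequate come from two independent filtering comprehensions instead of if/else appends.
import Mathlib
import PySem

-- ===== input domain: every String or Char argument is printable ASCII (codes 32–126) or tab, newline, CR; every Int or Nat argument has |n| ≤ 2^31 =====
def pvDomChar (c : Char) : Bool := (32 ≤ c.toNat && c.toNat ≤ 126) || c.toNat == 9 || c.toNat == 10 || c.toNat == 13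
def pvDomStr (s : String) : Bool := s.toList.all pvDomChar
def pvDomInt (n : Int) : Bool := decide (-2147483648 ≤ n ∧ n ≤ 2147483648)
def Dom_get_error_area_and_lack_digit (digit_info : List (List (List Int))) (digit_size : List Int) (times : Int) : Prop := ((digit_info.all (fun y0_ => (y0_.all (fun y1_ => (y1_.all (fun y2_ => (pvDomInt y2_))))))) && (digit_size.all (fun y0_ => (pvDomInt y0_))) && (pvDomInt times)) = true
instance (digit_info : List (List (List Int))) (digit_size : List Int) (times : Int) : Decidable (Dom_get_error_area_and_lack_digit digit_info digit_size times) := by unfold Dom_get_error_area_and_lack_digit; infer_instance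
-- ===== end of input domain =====

-- B never sorts the entries themselves: it groups the padded entries by their key tuple in a
-- dict and emits the groups in sorted key order (only the distinct keys are sorted); lack/adequate
-- come from two independent filtering comprehensions instead of if/else appends in an index loop.

-- ===== PORT A =====
-- the loop 'for i in range(len(digit_info)):' accumulating (error_area, lack_digit, adequate_digit)
def pvLoopA (digit_info : List (List (List Int))) (digit_size : List Int) : List (List Int) × List Int × List Int :=
  (PySem.List.pyRange 0 (PySem.List.len digit_info) 1).foldl
    (fun (st : List (List Int) × List Int × List Int) i =>
      (st.1 ++ ((PySem.List.enumerate (PySem.List.pyGetD digit_info i [])).filter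
                  (fun q => !q.2.isEmpty)).map (fun q => q.2 ++ [i, q.1]),
       if ((PySem.List.pyGetD digit_info i []).length : Int) < PySem.List.pyGetD digit_size i 0 then
         (st.2.1 ++ [i], st.2.2)
       else
         (st.2.1, st.2.2 ++ [i])))
    ([], [], [])

def get_error_area_and_lack_digit (digit_info : List (List (List Int))) (digit_size : List Int) (times : Int) : List (List Int) × List Int × List Int :=
  -- error_area = sorted(error_area, key = lambda x: (x[3], x[2])); return error_area, adequate_digit, lack_digit
  (PySem.List.sorted2 (pvLoopA digit_info digit_size).1
     (fun x => PySem.List.pyGetD x 3 0) (fun x => PySem.List.pyGetD x 2 0),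
   (pvLoopA digit_info digit_size).2.2, (pvLoopA digit_info digit_size).2.1)

-- ===== PORT B =====
-- 'key = (e[3], e[2])' read off the padded entry e
def pvKey (e : List Int) : Int × Int := (PySem.List.pyGetD e 3 0, PySem.List.pyGetD e 2 0)

-- 'groups.setdefault(key, []).append(e)' over the nested row/cell scan
def pvGroups (digit_info : List (List (List Int))) : PySem.Dict (Int × Int) (List (List Int)) :=
  (PySem.List.enumerate digit_info).foldl
    (fun d p => (PySem.List.enumerate p.2).foldl
      (fun d q => if q.2.isEmpty then d else
        d.modify (pvKey (q.2 ++ [p.1, q.1])) [] (· ++ [q.2 ++ [p.1, q.1]])) d)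
    PySem.Dict.empty

def get_error_area_and_lack_digit_alt (digit_info : List (List (List Int))) (digit_size : List Int) (times : Int) : List (List Int) × List Int × List Int :=
  -- error_area = [e for key in sorted(groups) for e in groups[key]]
  ((PySem.List.sorted2 (pvGroups digit_info).keys (fun c => c.1) (fun c => c.2)).flatMap
     (fun c => (pvGroups digit_info).getD c []),
   (PySem.List.enumerate digit_info).filterMap
     (fun p => if (p.2.length : Int) < PySem.List.pyGetD digit_size p.1 0 then none else some p.1),
   (PySem.List.enumerate digit_info).filterMap
     (fun p => if (p.2.length : Int) < PySem.List.pyGetD digit_size p.1 0 then some p.1 else none))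

-- ===== PRECONDITION & SPEC =====
-- Pre_ excludes exactly the inputs where A raises IndexError: digit_size shorter than digit_info
-- (the size lookup digit_size[i] raises), or some non-empty digit row of length 1 (the sort key x[3]
-- raises on its padded entry of length 3).
def Pre_get_error_area_and_lack_digit (digit_info : List (List (List Int))) (digit_size : List Int) (times : Int) : Prop :=
  digit_info.length ≤ digit_size.length ∧ ∀ row ∈ digit_info, ∀ x ∈ row, x = [] ∨ 2 ≤ x.length
instance (digit_info : List (List (List Int))) (digit_size : List Int) (times : Int) : Decidable (Pre_get_error_area_and_lack_digit digit_info digit_size times) := by unfold Pre_get_error_area_and_lack_digit; infer_instance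

def pvWitness_get_error_area_and_lack_digit : List (List (List Int)) × List Int × Int :=
  ([[[5, 6], []], [[1, 2, 3]]], [2, 1], 2)

def Spec_get_error_area_and_lack_digit (digit_info : List (List (List Int))) (digit_size : List Int) (times : Int) (out : List (List Int) × List Int × List Int) : Prop := out = get_error_area_and_lack_digit_alt digit_info digit_size times
instance (digit_info : List (List (List Int))) (digit_size : List Int) (times : Int) (out : List (List Int) × List Int × List Int) : Decidable (Spec_get_error_area_and_lack_digit digit_info digit_size times out) := by unfold Spec_get_error_area_and_lack_digit; infer_instance

-- ===== CLAIM (what is proved, stated in full; the proofs are below) =====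
def Claim_equal_get_error_area_and_lack_digit : Prop := ∀ (digit_info : List (List (List Int))) (digit_size : List Int) (times : Int), Dom_get_error_area_and_lack_digit digit_info digit_size times → Pre_get_error_area_and_lack_digit digit_info digit_size times → Spec_get_error_area_and_lack_digit digit_info digit_size times (get_error_area_and_lack_digit digit_info digit_size times)

-- ===== LEMMAS AND PROOFS =====

-- A's loop over enumerated rows, characterised: error entries are the padded cells in row order,
-- lack/adequate are filters
lemma loopA (dsz : List Int) (rows : List (List (List Int))) (s : Int)
    (e : List (List Int)) (l a : List Int) :
    (PySem.List.enumerate rows s).foldl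
      (fun (st : List (List Int) × List Int × List Int) p =>
        (st.1 ++ ((PySem.List.enumerate p.2).filter (fun q => !q.2.isEmpty)).map (fun q => q.2 ++ [p.1, q.1]),
         if (p.2.length : Int) < PySem.List.pyGetD dsz p.1 0 then (st.2.1 ++ [p.1], st.2.2)
         else (st.2.1, st.2.2 ++ [p.1])))
      (e, l, a)
    = (e ++ (PySem.List.enumerate rows s).flatMap
          (fun p => ((PySem.List.enumerate p.2).filter (fun q => !q.2.isEmpty)).map (fun q => q.2 ++ [p.1, q.1])),
       l ++ (PySem.List.enumerate rows s).filterMap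
          (fun p => if (p.2.length : Int) < PySem.List.pyGetD dsz p.1 0 then some p.1 else none),
       a ++ (PySem.List.enumerate rows s).filterMap
          (fun p => if (p.2.length : Int) < PySem.List.pyGetD dsz p.1 0 then none else some p.1)) := by
  induction rows generalizing s e l a with
  | nil => simp [PySem.List.enumerate]
  | cons r rs ih =>
    rw [PySem.List.enumerate_cons]
    simp only [List.foldl_cons, List.flatMap_cons, List.filterMap_cons]
    by_cases h : ((r.length : Int) < PySem.List.pyGetD dsz s 0)
    · simp [if_pos h, ih, List.append_assoc]
    · simp [if_neg h, ih, List.append_assoc]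

-- lexicographic ≤ / the strict-before Bool sorted2 uses, generic in a key function
def pvR {α : Type} (k : α → Int × Int) (a b : α) : Prop :=
  (k a).1 < (k b).1 ∨ ((k a).1 = (k b).1 ∧ (k a).2 ≤ (k b).2)
def pvLt {α : Type} (k : α → Int × Int) (a b : α) : Bool :=
  decide ((k a).1 < (k b).1) || (!decide ((k b).1 < (k a).1) && decide ((k a).2 < (k b).2))

lemma pvR_of_lt {α : Type} (k : α → Int × Int) {a b : α} (h : pvLt k a b = true) : pvR k a b := by
  simp [pvLt] at h; simp [pvR]; omega
lemma pvR_of_not_lt {α : Type} (k : α → Int × Int) {a b : α} (h : pvLt k a b = false) : pvR k b a := by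
  simp [pvLt] at h; simp [pvR]; omega
lemma pvR_trans {α : Type} (k : α → Int × Int) {a b c : α} (h1 : pvR k a b) (h2 : pvR k b c) : pvR k a c := by
  simp [pvR] at *; omega
lemma pvR_refl {α : Type} (k : α → Int × Int) (a : α) : pvR k a a := by simp [pvR]
lemma pvKey_ne_of_lt_of_R {α : Type} (k : α → Int × Int) {a b c : α}
    (h1 : pvLt k a b = true) (h2 : pvR k b c) : k c ≠ k a := by
  simp [pvLt] at h1; simp [pvR] at h2; intro h; rw [h] at h2; omega

-- inserting into a key-ordered list keeps it ordered
lemma pv_ins_pairwise {α : Type} (k : α → Int × Int) (e : α) (acc : List α)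
    (h : acc.Pairwise (pvR k)) : (PySem.List.insertBy (pvLt k) e acc).Pairwise (pvR k) := by
  induction acc with
  | nil => simp [PySem.List.insertBy]
  | cons y ys ih =>
    simp only [PySem.List.insertBy]
    rcases List.pairwise_cons.1 h with ⟨hy, hys⟩
    by_cases hb : pvLt k e y = true
    · rw [if_pos hb]
      refine List.pairwise_cons.2 ⟨?_, h⟩
      intro z hz
      rcases List.mem_cons.1 hz with rfl | hz
      · exact pvR_of_lt k hb
      · exact pvR_trans k (pvR_of_lt k hb) (hy z hz)
    · rw [if_neg hb]
      refine List.pairwise_cons.2 ⟨?_, ih hys⟩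
      intro z hz
      rcases (PySem.List.mem_insertBy (pvLt k) e z ys).1 hz with rfl | hz
      · exact pvR_of_not_lt k (Bool.eq_false_iff.2 hb)
      · exact hy z hz

-- inserting is stable: per key value it appends at the end of that key's block
lemma pv_ins_filter {α : Type} (k : α → Int × Int) (e : α) (acc : List α) (c : Int × Int)
    (h : acc.Pairwise (pvR k)) :
    (PySem.List.insertBy (pvLt k) e acc).filter (fun x => decide (k x = c))
      = acc.filter (fun x => decide (k x = c)) ++ if k e = c then [e] else [] := by
  induction acc with
  | nil => simp [PySem.List.insertBy, List.filter_cons]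
  | cons y ys ih =>
    rcases List.pairwise_cons.1 h with ⟨hy, hys⟩
    simp only [PySem.List.insertBy]
    by_cases hb : pvLt k e y = true
    · rw [if_pos hb]
      by_cases hec : k e = c
      · have hnil : (y :: ys).filter (fun x => decide (k x = c)) = [] := by
          refine List.filter_eq_nil_iff.2 ?_
          intro z hz
          have hzne : k z ≠ k e := by
            rcases List.mem_cons.1 hz with rfl | hz
            · exact pvKey_ne_of_lt_of_R k hb (pvR_refl k z)
            · exact pvKey_ne_of_lt_of_R k hb (hy z hz)
          simp [hec ▸ hzne]
        rw [List.filter_cons_of_pos (by simp [hec]), hnil]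
        simp [hec]
      · rw [List.filter_cons_of_neg (by simp [hec])]
        simp [hec]
    · rw [if_neg hb]
      by_cases hyc : k y = c
      · rw [List.filter_cons_of_pos (by simp [hyc]), List.filter_cons_of_pos (by simp [hyc]),
            ih hys, List.cons_append]
      · rw [List.filter_cons_of_neg (by simp [hyc]), List.filter_cons_of_neg (by simp [hyc]),
            ih hys]

-- the insertion fold is ordered and per-key stable
lemma pv_fold_pairwise {α : Type} (k : α → Int × Int) (xs acc : List α)
    (h : acc.Pairwise (pvR k)) :
    (xs.foldl (fun a e => PySem.List.insertBy (pvLt k) e a) acc).Pairwise (pvR k) := by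
  induction xs generalizing acc with
  | nil => exact h
  | cons e xs ih => exact ih _ (pv_ins_pairwise k e acc h)

lemma pv_fold_filter {α : Type} (k : α → Int × Int) (xs acc : List α) (c : Int × Int)
    (h : acc.Pairwise (pvR k)) :
    (xs.foldl (fun a e => PySem.List.insertBy (pvLt k) e a) acc).filter (fun x => decide (k x = c))
      = acc.filter (fun x => decide (k x = c)) ++ xs.filter (fun x => decide (k x = c)) := by
  induction xs generalizing acc with
  | nil => simp
  | cons e xs ih =>
    rw [List.foldl_cons, ih _ (pv_ins_pairwise k e acc h), pv_ins_filter k e acc c h]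
    by_cases hec : k e = c
    · rw [List.filter_cons_of_pos (by simp [hec])]
      simp [hec]
    · rw [List.filter_cons_of_neg (by simp [hec])]
      simp [hec]

-- a key-ordered list is determined by its per-key filters
lemma pv_filter_head_absent {α : Type} (k : α → Int × Int) (u : α) (us : List α) (c : Int × Int)
    (hu : ∀ z ∈ us, pvR k u z)
    (hlt : c.1 < (k u).1 ∨ (c.1 = (k u).1 ∧ c.2 < (k u).2)) :
    (u :: us).filter (fun x => decide (k x = c)) = [] := by
  refine List.filter_eq_nil_iff.2 ?_
  intro z hz
  simp only [decide_eq_true_eq]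
  intro hq
  rcases List.mem_cons.1 hz with rfl | hz'
  · rw [hq] at hlt; omega
  · have := hu z hz'
    simp only [pvR] at this
    rw [hq] at this
    omega

-- a key-ordered list is determined by its per-key filters
lemma pv_uniq {α : Type} (k : α → Int × Int) (ys : List α) :
    ∀ (zs : List α), ys.Pairwise (pvR k) → zs.Pairwise (pvR k) →
    (∀ c, ys.filter (fun x => decide (k x = c)) = zs.filter (fun x => decide (k x = c))) →
    ys = zs := by
  induction ys with
  | nil =>
    intro zs _ _ hf
    cases zs with
    | nil => rfl
    | cons b zs' =>
      have := hf (k b)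
      rw [List.filter_nil, List.filter_cons_of_pos (by simp)] at this
      exact absurd this.symm (by simp)
  | cons a ys' ih =>
    intro zs hy hz hf
    cases zs with
    | nil =>
      have := hf (k a)
      rw [List.filter_nil, List.filter_cons_of_pos (by simp)] at this
      exact absurd this (by simp)
    | cons b zs' =>
      rcases List.pairwise_cons.1 hy with ⟨hay, hy'⟩
      rcases List.pairwise_cons.1 hz with ⟨hbz, hz'⟩
      have hk : k a = k b := by
        by_contra hne
        have hlt : ((k a).1 < (k b).1 ∨ ((k a).1 = (k b).1 ∧ (k a).2 < (k b).2)) ∨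
            ((k b).1 < (k a).1 ∨ ((k b).1 = (k a).1 ∧ (k b).2 < (k a).2)) := by
          have : ¬((k a).1 = (k b).1 ∧ (k a).2 = (k b).2) := by
            intro h; exact hne (Prod.ext h.1 h.2)
          omega
        rcases hlt with h | h
        · have := hf (k a)
          rw [pv_filter_head_absent k b zs' (k a) hbz (by omega),
              List.filter_cons_of_pos (by simp)] at this
          exact absurd this (by simp)
        · have := hf (k b)
          rw [pv_filter_head_absent k a ys' (k b) hay (by omega),
              List.filter_cons_of_pos (by simp)] at this
          exact absurd this.symm (by simp)
      have hab : a = b ∧ ys'.filter (fun x => decide (k x = k a)) = zs'.filter (fun x => decide (k x = k a)) := by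
        have := hf (k a)
        rw [List.filter_cons_of_pos (by simp), List.filter_cons_of_pos (by simp [hk])] at this
        exact ⟨List.head_eq_of_cons_eq this, List.tail_eq_of_cons_eq this⟩
      refine hab.1 ▸ congrArg (List.cons a) (ih zs' hy' hz' ?_)
      intro c
      by_cases hc : c = k a
      · exact hc ▸ hab.2
      · have := hf c
        rw [List.filter_cons_of_neg (by simp only [decide_eq_true_eq]; intro hh; exact hc hh.symm),
            List.filter_cons_of_neg (by simp only [decide_eq_true_eq]; intro hh; exact hc (by rw [hk]; exact hh.symm))] at this
        exact this

-- a guarded fold is the fold over the filtered, mapped list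
lemma foldl_guard_filter_map {α β γ : Type} (P : α → Bool) (g : α → β) (f : γ → β → γ)
    (xs : List α) (acc : γ) :
    xs.foldl (fun acc x => if P x then acc else f acc (g x)) acc
    = ((xs.filter (fun x => !P x)).map g).foldl f acc := by
  induction xs generalizing acc with
  | nil => rfl
  | cons x xs ih =>
    by_cases h : P x <;> simp [h, ih]

-- a nested row/cell loop is a fold over the flattened padded cells
lemma nest_gen {γ : Type} (f : γ → List Int → γ) (rows : List (List (List Int))) (s : Int) (acc : γ) :
    (PySem.List.enumerate rows s).foldl
      (fun a p => (PySem.List.enumerate p.2).foldl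
         (fun a q => if q.2.isEmpty then a else f a (q.2 ++ [p.1, q.1])) a) acc
    = ((PySem.List.enumerate rows s).flatMap
        (fun p => ((PySem.List.enumerate p.2).filter (fun q => !q.2.isEmpty)).map
          (fun q => q.2 ++ [p.1, q.1]))).foldl f acc := by
  induction rows generalizing s acc with
  | nil => simp [PySem.List.enumerate]
  | cons r rs ih =>
    rw [PySem.List.enumerate_cons]
    simp only [List.foldl_cons, List.flatMap_cons, List.foldl_append]
    rw [foldl_guard_filter_map (fun q : Int × List Int => q.2.isEmpty)
          (fun q : Int × List Int => q.2 ++ [s, q.1]) f (PySem.List.enumerate r) acc]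
    exact ih _ _

-- flattening nodup ordered key groups: per-key filter recovers the group
lemma flatMap_if_single {β : Type} (ks : List (Int × Int)) (c : Int × Int) (L : List β)
    (hnd : ks.Nodup) (hc : c ∈ ks) :
    ks.flatMap (fun x => if x = c then L else []) = L := by
  induction ks with
  | nil => cases hc
  | cons x ks ih =>
    rcases List.nodup_cons.1 hnd with ⟨hx, hnd'⟩
    rcases List.mem_cons.1 hc with rfl | hc'
    · rw [List.flatMap_cons, if_pos rfl]
      have : ks.flatMap (fun y => if y = c then L else []) = [] := by
        refine List.flatMap_eq_nil_iff.2 ?_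
        intro y hy
        rw [if_neg (by rintro rfl; exact hx hy)]
      rw [this, List.append_nil]
    · rw [List.flatMap_cons, if_neg (by rintro rfl; exact hx hc'), List.nil_append]
      exact ih hnd' hc'

-- the flattened groups are key-ordered
lemma flatten_pairwise (FL : List (List Int)) (ks : List (Int × Int))
    (hks : ks.Pairwise (pvR (fun c => c))) :
    (ks.flatMap (fun c => FL.filter (fun e => decide (pvKey e = c)))).Pairwise (pvR pvKey) := by
  induction ks with
  | nil => simp
  | cons c ks ih =>
    rcases List.pairwise_cons.1 hks with ⟨hc, hks'⟩
    rw [List.flatMap_cons]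
    refine List.pairwise_append.2 ⟨?_, ih hks', ?_⟩
    · refine List.pairwise_iff_forall_sublist.2 ?_
      intro a b hab
      have ha := (List.mem_filter.1 (hab.subset (show a ∈ [a, b] by simp))).2
      have hb := (List.mem_filter.1 (hab.subset (show b ∈ [a, b] by simp))).2
      simp at ha hb
      simp [pvR, ha, hb]
    · intro a ha b hb
      have ha' := (List.mem_filter.1 ha).2
      rcases List.mem_flatMap.1 hb with ⟨c', hc', hbc'⟩
      have hb' := (List.mem_filter.1 hbc').2
      simp at ha' hb'
      have := hc c' hc'
      simp [pvR] at this ⊢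
      rw [ha', hb']
      exact this

-- ===== VERDICT (by name: the statement is the Claim_ definition above) =====
theorem get_error_area_and_lack_digit_spec : Claim_equal_get_error_area_and_lack_digit := by
  intro digit_info digit_size times _ _
  unfold Spec_get_error_area_and_lack_digit
  -- A's loop, characterised
  have h := loopA digit_size digit_info 0 [] [] []
  rw [PySem.List.enumerate_eq_map_pyRange digit_info ([] : List (List Int)), List.foldl_map] at h
  rw [← PySem.List.enumerate_eq_map_pyRange digit_info ([] : List (List Int))] at h
  simp only [List.nil_append] at h
  set FL := (PySem.List.enumerate digit_info).flatMap
      (fun p => ((PySem.List.enumerate p.2).filter (fun q => !q.2.isEmpty)).map (fun q => q.2 ++ [p.1, q.1])) with hFL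
  have h2 : pvLoopA digit_info digit_size =
      (FL,
       (PySem.List.enumerate digit_info).filterMap
          (fun p => if (p.2.length : Int) < PySem.List.pyGetD digit_size p.1 0 then some p.1 else none),
       (PySem.List.enumerate digit_info).filterMap
          (fun p => if (p.2.length : Int) < PySem.List.pyGetD digit_size p.1 0 then none else some p.1)) := by
    unfold pvLoopA; exact h
  -- B's dict, characterised through the pair fold
  have hD : pvGroups digit_info = FL.foldl
      (fun d e => d.modify (pvKey e) [] (· ++ [e])) PySem.Dict.empty := by
    unfold pvGroups
    exact nest_gen (fun (d : PySem.Dict (Int × Int) (List (List Int))) e =>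
      d.modify (pvKey e) [] (· ++ [e])) digit_info 0 PySem.Dict.empty
  have hDpair : pvGroups digit_info = (FL.map (fun e => (pvKey e, e))).foldl
      (fun d p => d.modify p.1 [] (· ++ [p.2])) PySem.Dict.empty := by
    rw [hD, List.foldl_map]
  have hgetD : ∀ c, (pvGroups digit_info).getD c [] = FL.filter (fun e => decide (pvKey e = c)) := by
    intro c
    rw [hDpair, PySem.Dict.getD_foldl_modify_append, PySem.Dict.getD_empty]
    rw [List.filter_map, List.map_map]
    simp only [Function.comp_def, List.nil_append, List.map_id']
    refine List.filter_congr fun e _ => ?_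
    by_cases h : pvKey e = c <;> simp [h]
  have hkeys : (pvGroups digit_info).keys = PySem.Set.ofList (FL.map pvKey) := by
    rw [hD, PySem.Dict.keys_foldl_modify_key]
    simp [PySem.Set.update, PySem.Dict.keys_empty, PySem.Set.ofList_eq_foldl]
  have hnd : (pvGroups digit_info).keys.Nodup := by
    rw [hkeys]; exact PySem.Set.nodup_ofList _
  -- both sorts are insertion folds
  have hsortA : PySem.List.sorted2 FL (fun x => PySem.List.pyGetD x 3 0) (fun x => PySem.List.pyGetD x 2 0)
      = FL.foldl (fun a e => PySem.List.insertBy (pvLt pvKey) e a) [] := rfl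
  have hsortK : PySem.List.sorted2 (pvGroups digit_info).keys (fun c => c.1) (fun c => c.2)
      = (pvGroups digit_info).keys.foldl (fun a e => PySem.List.insertBy (pvLt (fun c => c)) e a) [] := rfl
  set SK := PySem.List.sorted2 (pvGroups digit_info).keys (fun c => c.1) (fun c => c.2) with hSK
  have hSKperm : SK.Perm (pvGroups digit_info).keys := PySem.List.sorted2_perm _ _ _ _
  have hSKnd : SK.Nodup := hSKperm.nodup_iff.2 hnd
  have hSKpw : SK.Pairwise (pvR (fun c => c)) := by
    rw [hsortK]; exact pv_fold_pairwise _ _ _ (by simp)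
  -- B's error area, rewritten as flattened filters
  have hBerr : SK.flatMap (fun c => (pvGroups digit_info).getD c [])
      = SK.flatMap (fun c => FL.filter (fun e => decide (pvKey e = c))) := by
    exact List.flatMap_congr (fun c _ => hgetD c)
  -- the two sides agree via uniqueness of the key-ordered stable arrangement
  have hmain : FL.foldl (fun a e => PySem.List.insertBy (pvLt pvKey) e a) []
      = SK.flatMap (fun c => FL.filter (fun e => decide (pvKey e = c))) := by
    refine pv_uniq pvKey _ _ (pv_fold_pairwise _ _ _ (by simp)) (flatten_pairwise FL SK hSKpw) ?_
    intro c
    rw [pv_fold_filter pvKey FL [] c (by simp), List.filter_nil, List.nil_append]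
    have hfilter_flat : (SK.flatMap (fun c' => FL.filter (fun e => decide (pvKey e = c')))).filter
        (fun x => decide (pvKey x = c))
        = SK.flatMap (fun c' => if c' = c then FL.filter (fun e => decide (pvKey e = c)) else []) := by
      rw [List.filter_flatMap]
      refine List.flatMap_congr ?_
      intro c' _
      rw [List.filter_filter]
      by_cases hcc : c' = c
      · rw [if_pos hcc, hcc]
        refine List.filter_congr ?_
        intro e _; simp
      · rw [if_neg hcc]
        refine List.filter_eq_nil_iff.2 ?_
        intro e he; simp; intro h1 h2; exact hcc (h1.symm.trans h2).symm
    rw [hfilter_flat]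
    by_cases hc : c ∈ SK
    · exact (flatMap_if_single SK c _ hSKnd hc).symm
    · have h1 : SK.flatMap (fun c' => if c' = c then FL.filter (fun e => decide (pvKey e = c)) else []) = [] := by
        refine List.flatMap_eq_nil_iff.2 ?_
        intro c' hc'
        rw [if_neg (by rintro rfl; exact hc hc')]
      have h2 : FL.filter (fun e => decide (pvKey e = c)) = [] := by
        refine List.filter_eq_nil_iff.2 ?_
        intro e he
        simp
        intro hke
        apply hc
        have : pvKey e ∈ (pvGroups digit_info).keys := by
          rw [hkeys]
          exact (PySem.Set.mem_ofList _ _).2 (List.mem_map_of_mem he)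
        exact hke ▸ ((hSKperm.mem_iff).2 this)
      rw [h1, h2]
  -- assemble
  unfold get_error_area_and_lack_digit get_error_area_and_lack_digit_alt
  rw [h2]
  refine Prod.ext ?_ rfl
  show PySem.List.sorted2 FL _ _ = _
  rw [hsortA, hmain, ← hSK, hBerr]
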